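-- pv_equiv track=rewrite | github.com/vivekkurhe05/PythonBasicProgramming | StringExercises/exercise75.py | find_sub_str
-- ===== SOURCE A (Python) =====
-- def find_sub_str(str1):
--     counts={}
--     li=[]
--     for chr in str1:
--         count = 1
--         if chr in counts:
--             count+=1
--         counts[chr]=count
--     for chr in counts:
--         if counts[chr] == 1:
--             li.append(chr)
--     first_chr=li[0]
--     last_chr=li[-1]
--
--     return str1[str1.find(first_chr):str1.find(last_chr)+1]
-- ===== SOURCE B (Python) =====
-- def find_sub_str(str1):
--     counts = {}
--     for c in str1:
--         counts[c] = counts.get(c, 0) + 1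
--     positions = [i for i, c in enumerate(str1) if counts[c] == 1]
--     return str1[positions[0]:positions[-1] + 1]
-- ===== Notes on version B (the rewrite author's own statement) =====
-- stated objective: simpler
-- what changed: B collects the indices of once-occurring characters in one enumerate pass and slices between the first and last index, removing A's intermediate unique-char list and both str.find rescans.
import Mathlib
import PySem

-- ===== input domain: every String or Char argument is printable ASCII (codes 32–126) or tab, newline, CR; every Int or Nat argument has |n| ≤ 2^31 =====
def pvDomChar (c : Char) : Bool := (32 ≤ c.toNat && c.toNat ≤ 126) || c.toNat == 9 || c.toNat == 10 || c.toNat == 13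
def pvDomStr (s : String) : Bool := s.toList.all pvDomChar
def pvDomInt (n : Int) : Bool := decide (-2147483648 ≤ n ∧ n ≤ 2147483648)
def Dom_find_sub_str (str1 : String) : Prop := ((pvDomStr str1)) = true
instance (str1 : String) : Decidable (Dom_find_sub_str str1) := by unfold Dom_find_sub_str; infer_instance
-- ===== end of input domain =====

-- B collects the indices of once-occurring characters in one enumerate pass and slices between the
-- first and last such index, removing A's intermediate unique-char list and both str.find rescans.


-- ===== PORT A =====
def find_sub_str (str1 : String) : String :=
  let l := str1.toList
  let counts := l.foldl (fun d c => d.insert c (if d.contains c then 2 else (1 : Int))) PySem.Dict.empty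
  let li := counts.keys.foldl (fun acc c => if counts.getD c 0 == 1 then acc ++ [c] else acc) ([] : List Char)
  let first_chr := PySem.List.pyGetD li 0 ' '       -- li[0]; IndexError on empty li excluded by Pre_
  let last_chr := PySem.List.pyGetD li (-1) ' '     -- li[-1]
  String.ofList (PySem.Chars.slice l (some (PySem.Chars.find l [first_chr])) (some (PySem.Chars.find l [last_chr] + 1)))

-- ===== PORT B =====
def find_sub_str_alt (str1 : String) : String :=
  let l := str1.toList
  let counts := l.foldl (fun d c => d.insert c (d.getD c 0 + 1)) (PySem.Dict.empty : PySem.Dict Char Int)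
  let positions := (PySem.List.enumerate l 0).filterMap (fun p => if counts.getD p.2 0 == 1 then some p.1 else none)
  String.ofList (PySem.List.slice l (some (PySem.List.pyGetD positions 0 0)) (some (PySem.List.pyGetD positions (-1) 0 + 1)))

-- ===== PRECONDITION & SPEC =====
-- Pre_ excludes exactly the strings with no once-occurring character, on which A (li[0]) raises IndexError (and B raises too).
def Pre_find_sub_str (str1 : String) : Prop := (str1.toList.any (fun c => str1.toList.count c == 1)) = true
instance (str1 : String) : Decidable (Pre_find_sub_str str1) := by unfold Pre_find_sub_str; infer_instance
def pvWitness_find_sub_str : String := "ab"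
def Spec_find_sub_str (str1 : String) (out : String) : Prop := out = find_sub_str_alt str1
instance (str1 : String) (out : String) : Decidable (Spec_find_sub_str str1 out) := by unfold Spec_find_sub_str; infer_instance

-- ===== CLAIM (what is proved, stated in full; the proofs are below) =====
def Claim_equal_find_sub_str : Prop := ∀ (str1 : String), Dom_find_sub_str str1 → Pre_find_sub_str str1 → Spec_find_sub_str str1 (find_sub_str str1)

-- ===== LEMMAS AND PROOFS =====

-- A's counting dict: value 1 for a once-occurring key, 2 for a repeated key.
theorem aGet (l : List Char) (c : Char) :
    (l.foldl (fun d c => d.insert c (if d.contains c then 2 else (1 : Int))) PySem.Dict.empty).get? c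
      = if l.count c = 0 then none else if l.count c = 1 then some 1 else some 2 := by
  induction l using List.reverseRecOn with
  | nil => simp [PySem.Dict.get?_empty]
  | append_singleton t x ih =>
    rw [List.foldl_append]
    simp only [List.foldl_cons, List.foldl_nil]
    by_cases hc : c = x
    · subst hc
      rw [PySem.Dict.get?_insert_self, PySem.Dict.contains_eq_isSome_get?, ih]
      by_cases h0 : t.count c = 0
      · simp [h0, List.count_append]
      · by_cases h1 : t.count c = 1 <;>
          simp [h0, h1, List.count_append]
    · have hxc : x ≠ c := fun h => hc h.symm
      rw [PySem.Dict.get?_insert_of_ne _ _ hc, ih]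
      simp [List.count_append, hxc]

-- keys of A's dict are the distinct chars in first-occurrence order
theorem aKeys (l : List Char) :
    (l.foldl (fun d c => d.insert c (if d.contains c then 2 else (1 : Int))) PySem.Dict.empty).keys
      = PySem.List.dedup l := by
  rw [PySem.Dict.keys_foldl_insert, PySem.List.dedup_eq_ofList]
  rfl

-- filtering by a predicate true only on once-occurring elements sees dedup transparently
theorem dedup_filter (p : Char → Bool) (l : List Char) (h : ∀ c, p c = true → l.count c ≤ 1) :
    (PySem.List.dedup l).filter p = l.filter p := by
  induction l using List.reverseRecOn with
  | nil => rfl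
  | append_singleton t x ih =>
    have ht : ∀ c, p c = true → t.count c ≤ 1 := by
      intro c hc
      have := h c hc
      simp [List.count_append] at this
      omega
    rw [PySem.List.dedup_eq_ofList, PySem.Set.ofList_append]
    have hupd : (PySem.Set.ofList t).update [x] = (PySem.Set.ofList t).add x := rfl
    rw [hupd]
    by_cases hx : x ∈ PySem.Set.ofList t
    · rw [PySem.Set.add_of_mem hx]
      have hxmem : x ∈ t := by
        rwa [← PySem.List.dedup_eq_ofList, PySem.List.mem_dedup] at hx
      have hpx : p x = false := by
        by_contra hp
        have hp' : p x = true := by simpa using hp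
        have h2 : 2 ≤ (t ++ [x]).count x := by
          simp [List.count_append]
          exact hxmem
        have := h x hp'
        omega
      rw [← PySem.List.dedup_eq_ofList, ih ht]
      simp [List.filter_append, hpx]
    · rw [PySem.Set.add_of_not_mem hx, List.filter_append, List.filter_append,
        ← PySem.List.dedup_eq_ofList, ih ht]

-- snd of the filtered enumerate pairs is the filtered list
theorem pairs_map_snd (l : List Char) (s : Int) (q : Char → Bool) :
    ((PySem.List.enumerate l s).filter (fun p => q p.2)).map (·.2) = l.filter q := by
  induction l generalizing s with
  | nil => rfl
  | cons a t ih =>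
    rw [PySem.List.enumerate_cons]
    by_cases hq : q a <;> simp [hq, ih]

-- an if-some-else-none filterMap is map-of-filter
theorem filterMap_if (l : List (Int × Char)) (p : Int × Char → Bool) :
    l.filterMap (fun x => if p x then some x.1 else none) = (l.filter p).map (·.1) := by
  induction l with
  | nil => rfl
  | cons a t ih => by_cases h : p a <;> simp [h, ih]

-- two equal entries at distinct indices mean a count of at least 2
theorem two_le_count_of_two_getElem (l : List Char) (i j : Nat) (hij : i < j) (hj : j < l.length)
    (h : l[i]'(by omega) = l[j]) : 2 ≤ List.count l[j] l := by
  have h1 : List.Sublist [l[i]'(by omega)] (l.take j) :=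
    List.singleton_sublist.mpr (List.mem_take_iff_getElem.mpr ⟨i, by omega, by simp⟩)
  have h2 : List.Sublist [l[j]] (l.drop j) :=
    List.singleton_sublist.mpr (List.mem_iff_getElem.mpr ⟨0, by simp; omega, by simp⟩)
  have hs := List.Sublist.append h1 h2
  rw [List.take_append_drop] at hs
  rw [h] at hs
  exact List.duplicate_iff_two_le_count.mp (List.duplicate_iff_sublist.mpr hs)

-- a once-occurring character is found exactly at its index
theorem find_unique (l : List Char) (c : Char) (k : Nat) (hk : k < l.length) (hc : l[k] = c)
    (h1 : List.count c l = 1) : PySem.Chars.find l [c] = (k : Int) := by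
  have hmem : c ∈ l := hc ▸ List.getElem_mem hk
  have hinf : [c] <:+: l := (List.singleton_infix_iff c l).mpr hmem
  have hnn : 0 ≤ PySem.Chars.find l [c] := (PySem.Chars.find_nonneg_iff l [c]).mpr hinf
  obtain ⟨hpre, hmin⟩ := PySem.Chars.find_spec hnn
  set j := (PySem.Chars.find l [c]).toNat with hj
  have h0 : l[j + 0]? = some c := by
    rw [← List.getElem?_drop]
    rcases hpre with ⟨r, hr⟩
    rw [← hr]
    rfl
  rw [Nat.add_zero] at h0
  obtain ⟨hj', hlj⟩ := List.getElem?_eq_some_iff.mp h0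
  have hjk : j = k := by
    by_contra hne
    rcases Nat.lt_or_ge j k with h | h
    · have h2 := two_le_count_of_two_getElem l j k h hk (by rw [hlj, hc])
      rw [hc] at h2
      omega
    · have hkj : k < j := by omega
      have h2 := two_le_count_of_two_getElem l k j hkj hj' (by rw [hlj, hc])
      rw [hlj] at h2
      omega
  omega

-- ===== VERDICT (by name: the statement is the Claim_ definition above) =====
theorem find_sub_str_spec : Claim_equal_find_sub_str := by
  intro str1 _ hpre
  unfold Spec_find_sub_str
  simp only [find_sub_str, find_sub_str_alt]
  set l := str1.toList with hl
  set U : Char → Bool := fun c => l.count c == 1 with hU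
  set pairsU := (PySem.List.enumerate l 0).filter (fun p => U p.2) with hpairs
  -- A's membership test agrees with U
  have hA_test : ∀ c : Char,
      ((l.foldl (fun d c => d.insert c (if d.contains c then 2 else (1 : Int))) PySem.Dict.empty).getD c 0 == 1) = U c := by
    intro c
    rw [PySem.Dict.getD_eq_get?_getD, aGet]
    by_cases h0 : l.count c = 0
    · simp [h0, hU]
    · by_cases h1 : l.count c = 1 <;> simp [h0, h1, hU]
  -- B's membership test agrees with U
  have hB_test : ∀ c : Char,
      ((l.foldl (fun d c => d.insert c (d.getD c 0 + 1)) (PySem.Dict.empty : PySem.Dict Char Int)).getD c 0 == 1) = U c := by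
    intro c
    rw [PySem.Dict.getD_foldl_insert_add_one]
    have hemp : (PySem.Dict.empty : PySem.Dict Char Int).getD c 0 = 0 := by
      rw [PySem.Dict.getD_eq_get?_getD, PySem.Dict.get?_empty]
      rfl
    rw [hemp, zero_add]
    by_cases h1 : List.count c l = 1
    · simp [hU, h1]
    · have h1' : ((List.count c l : Int)) ≠ 1 := by exact_mod_cast h1
      simp [hU, h1, h1']
  -- A's li is the snds of pairsU
  have hli : (l.foldl (fun d c => d.insert c (if d.contains c then 2 else (1 : Int))) PySem.Dict.empty).keys.foldl
      (fun acc c => if (l.foldl (fun d c => d.insert c (if d.contains c then 2 else (1 : Int))) PySem.Dict.empty).getD c 0 == 1 then acc ++ [c] else acc) ([] : List Char)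
      = pairsU.map (·.2) := by
    have hcnt1 : ∀ c, U c = true → l.count c ≤ 1 := by
      intro c hc
      have h1 : l.count c = 1 := by simpa [hU] using hc
      omega
    rw [aKeys, PySem.List.foldl_append_if_eq_filter, List.filter_congr (fun c _ => hA_test c),
      dedup_filter U l hcnt1, hpairs, pairs_map_snd]
    simp
  -- B's positions are the fsts of pairsU
  have hposs : (PySem.List.enumerate l 0).filterMap
      (fun p => if (l.foldl (fun d c => d.insert c (d.getD c 0 + 1)) (PySem.Dict.empty : PySem.Dict Char Int)).getD p.2 0 == 1 then some p.1 else none)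
      = pairsU.map (·.1) := by
    rw [List.filterMap_congr (fun p _ => by rw [hB_test p.2]), filterMap_if, hpairs]
  -- pairsU is nonempty
  have hPne : pairsU ≠ [] := by
    rcases List.any_eq_true.mp hpre with ⟨c, hc, h1⟩
    have h1 : List.count c str1.toList = 1 := by simpa using h1
    intro h
    have : l.filter U ≠ [] :=
      List.ne_nil_of_mem (List.mem_filter.mpr ⟨hc, by simp [hU]; exact h1⟩)
    apply this
    rw [← pairs_map_snd l 0 U, ← hpairs, h]
    rfl
  -- each pair of pairsU: find at its char is its index
  have hfind : ∀ p ∈ pairsU, PySem.Chars.find l [p.2] = p.1 := by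
    intro p hp
    rw [hpairs, List.mem_filter] at hp
    obtain ⟨hpe, hpu⟩ := hp
    obtain ⟨k, hk, hpk⟩ := (PySem.List.mem_enumerate_iff l 0 p).mp hpe
    have h2 : p.2 = l[k] := by rw [hpk]
    have h1 : p.1 = (k : Int) := by rw [hpk]; simp
    have hcnt : List.count p.2 l = 1 := by simpa [hU] using hpu
    rw [h1, find_unique l p.2 k hk h2.symm hcnt]
  obtain ⟨p0, rest, hP⟩ := List.exists_cons_of_ne_nil hPne
  have hlast_mem : pairsU.getLast hPne ∈ pairsU := List.getLast_mem hPne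
  have hhead_mem : p0 ∈ pairsU := by rw [hP]; exact List.mem_cons_self
  have hmapne1 : pairsU.map (·.1) ≠ [] := by simp [hPne]
  have hmapne2 : pairsU.map (·.2) ≠ [] := by simp [hPne]
  rw [hli, hposs]
  -- resolve the four indexings
  have e1 : PySem.List.pyGetD (pairsU.map (·.2)) 0 ' ' = p0.2 := by
    rw [hP]; simp [PySem.List.pyGetD_zero_cons]
  have e2 : PySem.List.pyGetD (pairsU.map (·.2)) (-1) ' ' = (pairsU.getLast hPne).2 := by
    rw [PySem.List.pyGetD_neg_one _ _ hmapne2, List.getLast_map]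
  have e3 : PySem.List.pyGetD (pairsU.map (·.1)) 0 0 = p0.1 := by
    rw [hP]; simp [PySem.List.pyGetD_zero_cons]
  have e4 : PySem.List.pyGetD (pairsU.map (·.1)) (-1) 0 = (pairsU.getLast hPne).1 := by
    rw [PySem.List.pyGetD_neg_one _ _ hmapne1, List.getLast_map]
  rw [e1, e2, e3, e4, hfind p0 hhead_mem, hfind _ hlast_mem, PySem.Chars.slice_eq_listSlice]
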